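-- pv_equiv track=rewrite | github.com/stevet97/mind_mate_ai | data_ingestion/data_ingestion.py | filter_excessive_eos
-- ===== SOURCE A (Python) =====
-- def filter_excessive_eos(tokens, eos_id, max_repeats=2):
--     """Filters excessive consecutive EOS tokens."""
--     filtered_tokens = []
--     eos_count = 0
--
--     for token in tokens:
--         if token == eos_id:
--             eos_count += 1
--             if eos_count <= max_repeats:  # Allow max_repeats EOS tokens
--                 filtered_tokens.append(token)
--         else:
--             eos_count = 0
--             filtered_tokens.append(token)
--
--     return filtered_tokens
-- ===== SOURCE B (Python) =====
-- def filter_excessive_eos(tokens, eos_id, max_repeats=2):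
--     """Run-based rewrite: split into maximal runs of equal tokens,
--     truncate EOS runs to max_repeats, keep other runs whole."""
--     out = []
--     i = 0
--     n = len(tokens)
--     while i < n:
--         x = tokens[i]
--         j = i + 1
--         while j < n and tokens[j] == x:
--             j += 1
--         if x == eos_id:
--             out.extend(tokens[i : i + max(0, min(j - i, max_repeats))])
--         else:
--             out.extend(tokens[i:j])
--         i = j
--     return out
-- ===== Notes on version B (the rewrite author's own statement) =====
-- stated objective: alternative
-- what changed: Replaced A's per-token loop with a running eos-counter by a run-based decomposition: scan for maximal runs of equal tokens, truncate EOS runs to max_repeats via a slice, and keep other runs whole.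
import Mathlib
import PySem

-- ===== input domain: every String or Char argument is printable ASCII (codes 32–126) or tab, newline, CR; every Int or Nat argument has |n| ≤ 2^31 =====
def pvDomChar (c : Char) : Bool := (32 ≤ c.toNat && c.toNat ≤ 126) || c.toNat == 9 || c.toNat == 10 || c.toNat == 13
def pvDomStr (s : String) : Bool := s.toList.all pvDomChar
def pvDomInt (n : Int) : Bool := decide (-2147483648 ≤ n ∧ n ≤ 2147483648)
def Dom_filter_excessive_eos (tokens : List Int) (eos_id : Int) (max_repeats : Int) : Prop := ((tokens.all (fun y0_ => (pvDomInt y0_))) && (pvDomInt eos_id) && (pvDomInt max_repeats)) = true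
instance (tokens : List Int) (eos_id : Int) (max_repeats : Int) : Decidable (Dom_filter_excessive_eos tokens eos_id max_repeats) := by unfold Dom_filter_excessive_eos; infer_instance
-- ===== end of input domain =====

-- B replaces A's per-token eos-counter loop by a run-based decomposition (maximal runs of
-- equal tokens; EOS runs truncated to max_repeats, other runs kept whole): an alternative
-- of the same cost, proved to return the same list.

-- ===== PORT A =====
-- literal transliteration of A's loop; state = (filtered_tokens, eos_count)
def filter_excessive_eos (tokens : List Int) (eos_id : Int) (max_repeats : Int) : List Int :=
  (tokens.foldl
    (fun (st : List Int × Int) (token : Int) =>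
      if token == eos_id then
        let c := st.2 + 1
        ((if c ≤ max_repeats then st.1 ++ [token] else st.1), c)
      else
        (st.1 ++ [token], 0))
    (([] : List Int), (0 : Int))).1

-- ===== PORT B =====
-- inner `while j < n and tokens[j] == x: j += 1` of Source B
def pvRunEnd (tokens : List Int) (x : Int) (j : Nat) : Nat :=
  if h : j < tokens.length then
    if tokens[j] == x then pvRunEnd tokens x (j + 1) else j
  else j
termination_by tokens.length - j

-- needed only for the termination of pvOuter (the port cites it in decreasing_by)
theorem pvRunEnd_ge (tokens : List Int) (x : Int) (j : Nat) : j ≤ pvRunEnd tokens x j := by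
  unfold pvRunEnd
  split
  · split
    · exact le_trans (Nat.le_succ j) (pvRunEnd_ge tokens x (j + 1))
    · exact le_refl j
  · exact le_refl j
termination_by tokens.length - j

-- outer `while i < n` of Source B; the slices tokens[i:k] (with 0 ≤ i ≤ k ≤ n here) are exactly
-- (tokens.drop i).take (k - i)
def pvOuter (tokens : List Int) (eos_id : Int) (max_repeats : Int) (i : Nat) : List Int :=
  if h : i < tokens.length then
    let x := tokens[i]
    let j := pvRunEnd tokens x (i + 1)
    (if x == eos_id then
       (tokens.drop i).take (max 0 (min ((j : Int) - (i : Int)) max_repeats)).toNat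
     else
       (tokens.drop i).take (j - i))
    ++ pvOuter tokens eos_id max_repeats j
  else []
termination_by tokens.length - i
decreasing_by
  have := pvRunEnd_ge tokens tokens[i] (i + 1)
  omega

def filter_excessive_eos_alt (tokens : List Int) (eos_id : Int) (max_repeats : Int) : List Int :=
  pvOuter tokens eos_id max_repeats 0

-- ===== PRECONDITION & SPEC =====
def Spec_filter_excessive_eos (tokens : List Int) (eos_id : Int) (max_repeats : Int) (out : List Int) : Prop := out = filter_excessive_eos_alt tokens eos_id max_repeats
instance (tokens : List Int) (eos_id : Int) (max_repeats : Int) (out : List Int) : Decidable (Spec_filter_excessive_eos tokens eos_id max_repeats out) := by unfold Spec_filter_excessive_eos; infer_instance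

-- ===== CLAIM (what is proved, stated in full; the proofs are below) =====
def Claim_equal_filter_excessive_eos : Prop := ∀ (tokens : List Int) (eos_id : Int) (max_repeats : Int), Dom_filter_excessive_eos tokens eos_id max_repeats → Spec_filter_excessive_eos tokens eos_id max_repeats (filter_excessive_eos tokens eos_id max_repeats)

-- ===== LEMMAS AND PROOFS =====

-- A's loop as a plain recursion: the suffix of output produced from eos_count = c
def loopA (eos m : Int) : List Int → Int → List Int
  | [], _ => []
  | t :: ts, c =>
    if t == eos then (if c + 1 ≤ m then [t] else []) ++ loopA eos m ts (c + 1)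
    else t :: loopA eos m ts 0

-- the run-based recursion both ports are reduced to
def loopR (eos m : Int) : List Int → List Int
  | [] => []
  | x :: xs =>
    let u := xs.takeWhile (fun y => y == x)
    (if x == eos then
       (x :: u).take (max 0 (min ((1 + u.length : Int)) m)).toNat
     else x :: u)
    ++ loopR eos m (xs.dropWhile (fun y => y == x))
termination_by ts => ts.length
decreasing_by
  have := (List.dropWhile_sublist (l := xs) (p := fun y => y == x)).length_le
  simp; omega

theorem foldA (eos m : Int) (ts : List Int) (acc : List Int) (c : Int) :
    (ts.foldl
      (fun (st : List Int × Int) (token : Int) =>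
        if token == eos then
          let c := st.2 + 1
          ((if c ≤ m then st.1 ++ [token] else st.1), c)
        else
          (st.1 ++ [token], 0)) (acc, c)).1 = acc ++ loopA eos m ts c := by
  induction ts generalizing acc c with
  | nil => simp [loopA]
  | cons t ts ih =>
    rw [List.foldl_cons]
    show (List.foldl _ (if (t == eos) = true then
          ((if c + 1 ≤ m then acc ++ [t] else acc), c + 1) else (acc ++ [t], 0)) ts).1 = _
    by_cases h : t = eos
    · subst h
      simp only [beq_self_eq_true, if_true]
      by_cases hc : c + 1 ≤ m
      · rw [if_pos hc, ih, loopA]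
        simp [hc]
      · rw [if_neg hc, ih, loopA]
        simp [hc]
    · rw [if_neg (by simp [h]), ih, loopA]
      simp [h]

-- A over a block of eos tokens, starting from count c
theorem loopA_eos_run (eos m : Int) (u rest : List Int) (hu : ∀ y ∈ u, y = eos) (c : Int) :
    loopA eos m (u ++ rest) c = u.take (m - c).toNat ++ loopA eos m rest (c + u.length) := by
  induction u generalizing c with
  | nil => simp
  | cons x u ih =>
    have hx : x = eos := hu x (by simp)
    subst hx
    simp only [List.cons_append, loopA, beq_self_eq_true, if_true]
    rw [ih (fun y hy => hu y (by simp [hy]))]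
    have harg : c + 1 + (u.length : Int) = c + ((x :: u).length : Int) := by
      push_cast [List.length_cons]; ring
    rw [harg, ← List.append_assoc]
    congr 1
    by_cases hc : c + 1 ≤ m
    · have h1 : (m - c).toNat = (m - (c + 1)).toNat + 1 := by omega
      rw [if_pos hc, h1, List.take_succ_cons]
      rfl
    · have h1 : (m - c).toNat = 0 := by omega
      have h2 : (m - (c + 1)).toNat = 0 := by omega
      rw [if_neg hc, h1, h2]
      simp

-- A passes a block of non-eos tokens through unchanged
theorem loopA_non_eos_run (eos m : Int) (u rest : List Int) (hu : ∀ y ∈ u, y ≠ eos) :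
    loopA eos m (u ++ rest) 0 = u ++ loopA eos m rest 0 := by
  induction u with
  | nil => simp
  | cons x u ih =>
    have hx : x ≠ eos := hu x (by simp)
    simp only [List.cons_append, loopA, beq_iff_eq, if_neg hx]
    rw [ih (fun y hy => hu y (by simp [hy]))]

-- the count is irrelevant when the next token is not eos (or the list is empty)
theorem loopA_count_irrel (eos m : Int) (rest : List Int)
    (h : ∀ z, rest.head? = some z → z ≠ eos) (c : Int) :
    loopA eos m rest c = loopA eos m rest 0 := by
  cases rest with
  | nil => rfl
  | cons z w =>
    have hz : z ≠ eos := h z rfl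
    simp [loopA, hz]

theorem loopA_eq_loopR (eos m : Int) : ∀ ts : List Int, loopA eos m ts 0 = loopR eos m ts
  | [] => by simp [loopA, loopR]
  | x :: xs => by
    have hwhead : ∀ z, (List.dropWhile (fun y => y == x) xs).head? = some z → z ≠ x := by
      intro z hz hzx
      have hne : List.dropWhile (fun y => y == x) xs ≠ [] := by
        intro hnil; rw [hnil] at hz; simp at hz
      have hhead := List.head_dropWhile_not (fun y => y == x) (l := xs) hne
      rw [List.head?_eq_some_head hne] at hz
      simp only [Option.some.injEq] at hz
      rw [hz, hzx] at hhead
      simp at hhead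
    have hmem0 : ∀ y ∈ List.takeWhile (fun y => y == x) xs, y = x := by
      intro y hy
      exact beq_iff_eq.mp (List.mem_takeWhile_imp (p := fun y => y == x) (l := xs) hy)
    have hsplit : List.takeWhile (fun y => y == x) xs ++ List.dropWhile (fun y => y == x) xs = xs :=
      List.takeWhile_append_dropWhile
    set u := xs.takeWhile (fun y => y == x) with hu
    set w := xs.dropWhile (fun y => y == x) with hw
    have ihw : loopA eos m w 0 = loopR eos m w := loopA_eq_loopR eos m w
    by_cases hx : x = eos
    · have h1 : loopA eos m (x :: xs) 0
          = (x :: u).take (m - 0).toNat ++ loopA eos m w ((0 : Int) + (x :: u).length) := by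
        conv_lhs => rw [← hsplit, ← List.cons_append]
        exact loopA_eos_run eos m (x :: u) w
          (by intro y hy
              rcases List.mem_cons.mp hy with h | h
              · rw [h, hx]
              · rw [hmem0 y h, hx]) 0
      rw [h1, loopA_count_irrel eos m w (fun z hz h2 => hwhead z hz (h2.trans hx.symm)), ihw]
      rw [loopR]
      simp only [← hu, ← hw]
      rw [if_pos (by simp [hx])]
      congr 1
      rw [List.take_eq_take_iff]
      simp only [List.length_cons]
      omega
    · have h1 : loopA eos m (x :: xs) 0 = (x :: u) ++ loopA eos m w 0 := by
        conv_lhs => rw [← hsplit, ← List.cons_append]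
        exact loopA_non_eos_run eos m (x :: u) w
          (by intro y hy
              rcases List.mem_cons.mp hy with h | h
              · rw [h]; exact hx
              · rw [hmem0 y h]; exact hx)
      rw [h1, ihw, loopR]
      simp only [← hu, ← hw]
      rw [if_neg (by simp [hx])]
  termination_by ts => ts.length
  decreasing_by
    have := (List.dropWhile_sublist (l := xs) (p := fun y => y == x)).length_le
    simp; omega

-- pvRunEnd finds the end of the maximal run of x starting at index j
theorem pvRunEnd_eq (tokens : List Int) (x : Int) (j : Nat) :
    pvRunEnd tokens x j = j + ((tokens.drop j).takeWhile (fun y => y == x)).length := by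
  unfold pvRunEnd
  split
  · rename_i h
    rw [List.drop_eq_getElem_cons h, List.takeWhile_cons]
    split
    · rw [pvRunEnd_eq tokens x (j + 1), List.length_cons]
      omega
    · simp
  · rename_i h
    have hnil : tokens.drop j = [] := List.drop_eq_nil_of_le (by omega)
    rw [hnil]
    simp
termination_by tokens.length - j

-- B's outer loop computes the run-based recursion on the remaining suffix
theorem pvOuter_eq (tokens : List Int) (eos m : Int) (i : Nat) :
    pvOuter tokens eos m i = loopR eos m (tokens.drop i) := by
  rw [pvOuter]
  split
  · rename_i h
    show ((if (tokens[i] == eos) = true then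
        (tokens.drop i).take
          (max 0 (min ((pvRunEnd tokens tokens[i] (i + 1) : Int) - (i : Int)) m)).toNat
      else
        (tokens.drop i).take (pvRunEnd tokens tokens[i] (i + 1) - i))
      ++ pvOuter tokens eos m (pvRunEnd tokens tokens[i] (i + 1))) = loopR eos m (tokens.drop i)
    have hdrop : tokens.drop i = tokens[i] :: tokens.drop (i + 1) := List.drop_eq_getElem_cons h
    set x := tokens[i] with hxdef
    have hsplit : (tokens.drop (i + 1)).takeWhile (fun y => y == x)
        ++ (tokens.drop (i + 1)).dropWhile (fun y => y == x) = tokens.drop (i + 1) :=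
      List.takeWhile_append_dropWhile
    set u := (tokens.drop (i + 1)).takeWhile (fun y => y == x) with hu
    set w := (tokens.drop (i + 1)).dropWhile (fun y => y == x) with hw
    have hj : pvRunEnd tokens x (i + 1) = i + 1 + u.length := pvRunEnd_eq tokens x (i + 1)
    have hrec : pvOuter tokens eos m (pvRunEnd tokens x (i + 1))
        = loopR eos m (tokens.drop (pvRunEnd tokens x (i + 1))) :=
      pvOuter_eq tokens eos m (pvRunEnd tokens x (i + 1))
    have hdropj : tokens.drop (pvRunEnd tokens x (i + 1)) = w := by
      rw [hj]
      have h2 : tokens.drop (i + 1 + u.length) = (tokens.drop (i + 1)).drop u.length := by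
        rw [List.drop_drop]
      rw [h2]
      conv_lhs => rw [← hsplit]
      rw [List.drop_left]
    rw [hrec, hdropj]
    conv_rhs => rw [hdrop, loopR]
    simp only [← hu, ← hw]
    congr 1
    split
    · have harith : ((pvRunEnd tokens x (i + 1) : Int) - (i : Int)) = (1 + u.length : Int) := by
        rw [hj]; push_cast; ring
      rw [harith, hdrop]
      have hKle : (max 0 (min ((1 + u.length : Int)) m)).toNat ≤ (x :: u).length := by
        simp only [List.length_cons]; omega
      conv_lhs => rw [← hsplit, ← List.cons_append]
      rw [List.take_append_of_le_length hKle]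
    · rw [hdrop, hj]
      have hlen : i + 1 + u.length - i = (x :: u).length := by
        simp only [List.length_cons]; omega
      rw [hlen]
      conv_lhs => rw [← hsplit, ← List.cons_append]
      rw [List.take_append_of_le_length (le_refl _), List.take_length]
  · rename_i h
    have hnil : tokens.drop i = [] := List.drop_eq_nil_of_le (by omega)
    rw [hnil, loopR]
termination_by tokens.length - i
decreasing_by
  have := pvRunEnd_ge tokens tokens[i] (i + 1)
  omega

-- ===== VERDICT (by name: the statement is the Claim_ definition above) =====
theorem filter_excessive_eos_spec : Claim_equal_filter_excessive_eos := by
  intro tokens eos_id max_repeats _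
  show filter_excessive_eos tokens eos_id max_repeats
      = filter_excessive_eos_alt tokens eos_id max_repeats
  rw [filter_excessive_eos, filter_excessive_eos_alt, foldA, pvOuter_eq, List.drop_zero,
    loopA_eq_loopR, List.nil_append]
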